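-- pv_equiv track=rewrite | github.com/ChharithOeun/Final-Fantasy-XI | FFXI-Demoncore/server/player_progression/skill_mastery.py | _level_for_xp
-- ===== SOURCE A (Python) =====
-- MASTERY_XP_THRESHOLDS: dict[int, int] = {
--     1: 50,
--     2: 150,
--     3: 350,
--     4: 700,
--     5: 1500,
-- }
--
-- def _level_for_xp(xp: int) -> int:
--     """Resolve the mastery level from cumulative XP."""
--     level = 0
--     for tier, threshold in sorted(MASTERY_XP_THRESHOLDS.items()):
--         if xp >= threshold:
--             level = tier
--         else:
--             break
--     return level
-- ===== SOURCE B (Python) =====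
-- MASTERY_XP_THRESHOLDS: dict[int, int] = {
--     1: 50,
--     2: 150,
--     3: 350,
--     4: 700,
--     5: 1500,
-- }
--
-- # Threshold values sorted once; since tiers are the contiguous levels 1..5,
-- # the number of thresholds <= xp *is* the mastery level.
-- _THRESHOLDS = sorted(MASTERY_XP_THRESHOLDS.values())
--
--
-- def _level_for_xp(xp: int) -> int:
--     """Resolve the mastery level from cumulative XP via binary search."""
--     lo, hi = 0, len(_THRESHOLDS)
--     while lo < hi:
--         mid = (lo + hi) // 2
--         if xp < _THRESHOLDS[mid]:
--             hi = mid
--         else: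
--             lo = mid + 1
--     return lo
-- ===== Notes on version B (the rewrite author's own statement) =====
-- stated objective: alternative
-- what changed: Replaces the linear scan-with-break over sorted (tier, threshold) pairs by a hand-rolled bisect_right binary search over the sorted threshold values, returning the insertion count as the level (valid because tiers are contiguous 1..5).
import Mathlib
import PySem

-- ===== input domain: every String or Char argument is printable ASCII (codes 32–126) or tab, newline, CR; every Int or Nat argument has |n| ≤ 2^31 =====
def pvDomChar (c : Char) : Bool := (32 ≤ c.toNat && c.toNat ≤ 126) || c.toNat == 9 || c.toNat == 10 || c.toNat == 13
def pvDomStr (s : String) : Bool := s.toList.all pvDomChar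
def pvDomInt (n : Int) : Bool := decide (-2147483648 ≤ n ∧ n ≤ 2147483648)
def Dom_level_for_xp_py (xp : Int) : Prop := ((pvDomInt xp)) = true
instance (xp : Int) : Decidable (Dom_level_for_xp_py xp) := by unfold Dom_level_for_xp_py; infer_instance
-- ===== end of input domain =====

-- B replaces A's linear scan-with-break by a bisect_right binary search over the
-- sorted threshold values (alternative algorithm; return value proved equal).

-- ===== PORT A =====
-- the module-level dict MASTERY_XP_THRESHOLDS, in insertion order
def pvMasteryThresholds : List (Int × Int) := [(1, 50), (2, 150), (3, 350), (4, 700), (5, 1500)]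

-- the for-loop with break: state is `level`
def pvALoop (xp : Int) : Int → List (Int × Int) → Int
  | level, [] => level
  | level, (tier, threshold) :: rest =>
      if xp ≥ threshold then pvALoop xp tier rest else level

def level_for_xp_py (xp : Int) : Int :=
  -- sorted(d.items()): keys are distinct, so Python's lexicographic tuple sort
  -- is exactly the stable sort by first component here
  pvALoop xp 0 (PySem.List.sorted pvMasteryThresholds (fun p => p.1) false)

-- ===== PORT B =====
-- _THRESHOLDS = sorted(MASTERY_XP_THRESHOLDS.values())
def pvSortedThresholds : List Int :=
  PySem.List.sorted (pvMasteryThresholds.map Prod.snd) (fun v => v) false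

-- the while-loop of the binary search; index mid is always in range, so getD is exact
def pvBSearch (xp : Int) (lo hi : Nat) : Nat :=
  if lo < hi then
    let mid := (lo + hi) / 2
    if xp < pvSortedThresholds.getD mid 0 then pvBSearch xp lo mid
    else pvBSearch xp (mid + 1) hi
  else lo
termination_by hi - lo
decreasing_by all_goals omega

def level_for_xp_py_alt (xp : Int) : Int :=
  (pvBSearch xp 0 pvSortedThresholds.length : Int)

-- ===== PRECONDITION & SPEC =====
def Spec_level_for_xp_py (xp : Int) (out : Int) : Prop := out = level_for_xp_py_alt xp
instance (xp : Int) (out : Int) : Decidable (Spec_level_for_xp_py xp out) := by unfold Spec_level_for_xp_py; infer_instance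

-- ===== CLAIM (what is proved, stated in full; the proofs are below) =====
def Claim_equal_level_for_xp_py : Prop := ∀ (xp : Int), Dom_level_for_xp_py xp → Spec_level_for_xp_py xp (level_for_xp_py xp)

-- ===== LEMMAS AND PROOFS =====
theorem pvSorted_items :
    PySem.List.sorted pvMasteryThresholds (fun p => p.1) false = pvMasteryThresholds := by
  decide

theorem pvSorted_values : pvSortedThresholds = [50, 150, 350, 700, 1500] := by
  decide

theorem pvBSearch_step (xp : Int) (lo hi : Nat) (h : lo < hi) :
    pvBSearch xp lo hi =
      if xp < pvSortedThresholds.getD ((lo + hi) / 2) 0 then pvBSearch xp lo ((lo + hi) / 2)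
      else pvBSearch xp ((lo + hi) / 2 + 1) hi := by
  rw [pvBSearch]; simp [h]

theorem pvBSearch_done (xp : Int) (lo hi : Nat) (h : ¬ lo < hi) :
    pvBSearch xp lo hi = lo := by
  rw [pvBSearch]; simp [h]

-- ===== VERDICT (by name: the statement is the Claim_ definition above) =====
theorem level_for_xp_py_spec : Claim_equal_level_for_xp_py := by
  intro xp _
  unfold Spec_level_for_xp_py level_for_xp_py level_for_xp_py_alt
  rw [pvSorted_items]
  simp [pvALoop, pvMasteryThresholds, pvSorted_values, pvBSearch_step, pvBSearch_done]
  split_ifs <;> omega
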